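-- pv_equiv track=rewrite | github.com/samirelanduk/ZincBindPredict | core/utilities.py | split_family
-- ===== SOURCE A (Python) =====
-- def split_family(family):
--     """Takes a family such as 'C3H1' and splits it into subfamilies such as 'C3'
--     and 'H1'."""
--
--     subfamilies, subfamily = [], ""
--     for char in family:
--         if char.isalpha() and subfamily:
--             subfamilies.append(subfamily)
--             subfamily = ""
--         subfamily += char
--     subfamilies.append(subfamily)
--     return subfamilies
-- ===== SOURCE B (Python) =====
-- def split_family(family):
--     boundaries = [i for i, c in enumerate(family) if i > 0 and c.isalpha()]
--     positions = [0] + boundaries + [len(family)]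
--     return [family[a:b] for a, b in zip(positions, positions[1:])]
-- ===== Notes on version B (the rewrite author's own statement) =====
-- stated objective: alternative
-- what changed: B first builds an index table of segment-boundary positions (enumerate + filter), forms cut points [0]+boundaries+[len], and produces the segments by slicing adjacent cut-point pairs, instead of A's single pass accumulating characters into a running buffer.
import Mathlib
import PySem

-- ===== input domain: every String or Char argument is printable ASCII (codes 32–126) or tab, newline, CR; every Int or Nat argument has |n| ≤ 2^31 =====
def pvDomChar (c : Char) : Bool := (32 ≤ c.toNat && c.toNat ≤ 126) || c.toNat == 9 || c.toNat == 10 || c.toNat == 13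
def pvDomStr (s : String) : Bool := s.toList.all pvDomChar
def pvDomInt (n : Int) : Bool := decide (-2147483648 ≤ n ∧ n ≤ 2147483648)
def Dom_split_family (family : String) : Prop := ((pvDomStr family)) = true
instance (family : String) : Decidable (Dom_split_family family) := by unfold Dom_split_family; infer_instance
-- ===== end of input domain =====

-- B builds an index table of boundary positions and slices adjacent cut points; A accumulates a running buffer. Alternative decomposition, same cost.

-- ===== PORT A =====
-- strings are handled as their character lists; subfamily += char is buffer append
def split_family (family : String) : List String :=
  let r := family.toList.foldl
    (fun (st : List (List Char) × List Char) c =>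
      if PySem.Chars.isalpha c && !st.2.isEmpty then (st.1 ++ [st.2], [c])
      else (st.1, st.2 ++ [c]))
    ([], [])
  (r.1 ++ [r.2]).map (fun l => String.ofList l)

-- ===== PORT B =====
def split_family_alt (family : String) : List String :=
  let s := family.toList
  let boundaries := ((PySem.List.enumerate s 0).filter
      (fun p => decide (0 < p.1) && PySem.Chars.isalpha p.2)).map Prod.fst
  let positions := (0 : Int) :: (boundaries ++ [(s.length : Int)])
  (positions.zip positions.tail).map
    (fun ab => String.ofList (PySem.List.slice s (some ab.1) (some ab.2)))

-- ===== PRECONDITION & SPEC =====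
def Spec_split_family (family : String) (out : List String) : Prop := out = split_family_alt family
instance (family : String) (out : List String) : Decidable (Spec_split_family family out) := by unfold Spec_split_family; infer_instance

-- ===== CLAIM (what is proved, stated in full; the proofs are below) =====
def Claim_equal_split_family : Prop := ∀ (family : String), Dom_split_family family → Spec_split_family family (split_family family)

-- ===== LEMMAS AND PROOFS =====

-- A's loop body
def pvStepA (st : List (List Char) × List Char) (c : Char) : List (List Char) × List Char :=
  if PySem.Chars.isalpha c && !st.2.isEmpty then (st.1 ++ [st.2], [c]) else (st.1, st.2 ++ [c])

-- B's boundary index list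
def pvBnds (l : List Char) : List Int :=
  ((PySem.List.enumerate l 0).filter (fun p => decide (0 < p.1) && PySem.Chars.isalpha p.2)).map Prod.fst

-- last committed cut point
def pvLast (l : List Char) : Int := ((pvBnds l).getLast?).getD 0

-- segments cut by a list of positions
def pvSegs (l : List Char) (ps : List Int) : List (List Char) :=
  (ps.zip ps.tail).map (fun ab => PySem.List.slice l (some ab.1) (some ab.2))

lemma pvMem_bnds {l : List Char} {x : Int} (h : x ∈ pvBnds l) : 0 < x ∧ x < (l.length : Int) := by
  simp only [pvBnds, List.mem_map, List.mem_filter] at h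
  obtain ⟨p, ⟨hp, hc⟩, rfl⟩ := h
  rw [PySem.List.mem_enumerate_iff] at hp
  obtain ⟨k, hk, rfl⟩ := hp
  simp_all

lemma pvBnds_snoc (t : List Char) (c : Char) :
    pvBnds (t ++ [c]) =
      pvBnds t ++ (if 0 < t.length ∧ PySem.Chars.isalpha c then [(t.length : Int)] else []) := by
  simp only [pvBnds, PySem.List.enumerate_append, List.filter_append, List.map_append]
  congr 1
  simp [PySem.List.enumerate_cons, PySem.List.enumerate_nil, List.filter]
  by_cases ha : PySem.Chars.isalpha c <;> by_cases ht : 0 < t.length <;> simp_all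

lemma pvSegs_snoc_stable {t : List Char} {c : Char} {ps : List Int}
    (h : ∀ x ∈ ps, 0 ≤ x ∧ x ≤ (t.length : Int)) : pvSegs (t ++ [c]) ps = pvSegs t ps := by
  unfold pvSegs
  refine List.map_congr_left ?_
  rintro ⟨a, b⟩ hab
  have hm := List.of_mem_zip hab
  have ha := h a hm.1
  have hb := h b (List.mem_of_mem_tail hm.2)
  have ha' : a.toNat ≤ t.length := by omega
  have hb' : b.toNat ≤ t.length := by omega
  rw [PySem.List.slice_toNat _ ha.1 hb.1, PySem.List.slice_toNat _ ha.1 hb.1,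
    List.drop_append, List.take_append_of_le_length (by simp; omega)]

lemma pvSegs_concat (s : List Char) (q : List Int) (x : Int) (h : q ≠ []) :
    pvSegs s (q ++ [x]) =
      pvSegs s q ++ [PySem.List.slice s (some ((q.getLast?).getD 0)) (some x)] := by
  induction q with
  | nil => simp at h
  | cons a q ih =>
    cases q with
    | nil => simp [pvSegs]
    | cons b q =>
      have := ih (by simp)
      simp only [pvSegs, List.cons_append, List.tail_cons, List.zip_cons_cons, List.map_cons] at this ⊢
      rw [this]
      simp

lemma pvLast_nonneg (l : List Char) : 0 ≤ pvLast l := by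
  unfold pvLast
  cases h : (pvBnds l).getLast? with
  | none => simp
  | some x => have := pvMem_bnds (List.mem_of_getLast? h); simp; omega

lemma pvLast_lt (l : List Char) (h : l ≠ []) : pvLast l < (l.length : Int) := by
  unfold pvLast
  cases hg : (pvBnds l).getLast? with
  | none => simp; cases l with | nil => simp at h | cons a t => simp
  | some x => have := pvMem_bnds (List.mem_of_getLast? hg); simpa using this.2

lemma pvInvA (l : List Char) :
    l.foldl pvStepA ([], []) =
      (pvSegs l ((0 : Int) :: pvBnds l), l.drop (pvLast l).toNat) := by
  induction l using List.reverseRecOn with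
  | nil => simp [pvSegs, pvBnds, PySem.List.enumerate_nil]
  | append_singleton t c ih =>
    have hmem : ∀ x ∈ (0 : Int) :: pvBnds t, 0 ≤ x ∧ x ≤ (t.length : Int) := by
      intro x hx
      rcases List.mem_cons.1 hx with rfl | hx
      · simp
      · have := pvMem_bnds hx; omega
    have hlastnn := pvLast_nonneg t
    rw [List.foldl_append, List.foldl_cons, List.foldl_nil, ih]
    by_cases ht : t = []
    · subst ht
      simp only [pvStepA, pvBnds_snoc, pvLast]
      simp [pvSegs, pvBnds, PySem.List.enumerate_nil]
    · have hlt := pvLast_lt t ht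
      have hbuf : ¬ (t.drop (pvLast t).toNat).isEmpty := by
        simp [List.isEmpty_iff, List.drop_eq_nil_iff]
        omega
      by_cases ha : PySem.Chars.isalpha c
      · -- new boundary at t.length
        have hcond : 0 < t.length ∧ PySem.Chars.isalpha c := ⟨by cases t <;> simp_all, ha⟩
        have hb := pvBnds_snoc t c
        rw [if_pos hcond] at hb
        have hlast' : pvLast (t ++ [c]) = (t.length : Int) := by
          unfold pvLast; rw [hb]; simp
        simp only [pvStepA, ha, hbuf, Bool.not_false, Bool.and_self, if_pos]
        rw [hb, hlast']
        simp only [Prod.mk.injEq]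
        constructor
        · show _ ++ _ = pvSegs (t ++ [c]) (((0 : Int) :: pvBnds t) ++ [(t.length : Int)])
          rw [pvSegs_concat _ _ _ (by simp), pvSegs_snoc_stable hmem]
          congr 1
          have hgl : (((0 : Int) :: pvBnds t).getLast?).getD 0 = pvLast t := by
            unfold pvLast; cases hg : (pvBnds t).getLast? <;> simp [List.getLast?_cons, hg]
          rw [hgl, PySem.List.slice_toNat _ hlastnn (by positivity),
            List.drop_append, List.take_append_of_le_length (by simp)]
          simp
        · rw [List.drop_append, Nat.sub_eq_zero_of_le (by simp), List.drop_eq_nil_iff.2 (by simp)]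
          simp
      · have hb := pvBnds_snoc t c
        rw [if_neg (by tauto)] at hb
        simp at hb
        have hlast' : pvLast (t ++ [c]) = pvLast t := by unfold pvLast; rw [hb]
        simp only [pvStepA, ha, Bool.false_and, Bool.false_eq_true, if_false]
        rw [hb, hlast', pvSegs_snoc_stable hmem, List.drop_append,
          Nat.sub_eq_zero_of_le (by omega)]
        simp

lemma pvGetD_last (l : List Char) : (((0 : Int) :: pvBnds l).getLast?).getD 0 = pvLast l := by
  unfold pvLast; cases hg : (pvBnds l).getLast? <;> simp [List.getLast?_cons, hg]

lemma pvLast_le (l : List Char) : pvLast l ≤ (l.length : Int) := by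
  rcases eq_or_ne l [] with rfl | h
  · simp [pvLast, pvBnds, PySem.List.enumerate_nil]
  · exact le_of_lt (pvLast_lt l h)

-- ===== VERDICT (by name: the statement is the Claim_ definition above) =====
theorem split_family_spec : Claim_equal_split_family := by
  intro family _
  unfold Spec_split_family
  have h1 : split_family family =
      ((family.toList.foldl pvStepA ([], [])).1 ++
        [(family.toList.foldl pvStepA ([], [])).2]).map (fun l => String.ofList l) := rfl
  have h2 : split_family_alt family =
      (pvSegs family.toList
        (((0 : Int) :: pvBnds family.toList) ++ [(family.toList.length : Int)])).map String.ofList := by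
    simp [split_family_alt, pvSegs, pvBnds, List.map_map, Function.comp_def]
  set l := family.toList with hl
  have h3 : (pvLast l).toNat ≤ l.length := by
    have := pvLast_le l; have := pvLast_nonneg l; omega
  have hsl : PySem.List.slice l (some (pvLast l)) (some (l.length : Int)) = l.drop (pvLast l).toNat := by
    rw [PySem.List.slice_toNat _ (pvLast_nonneg l) (by positivity)]
    apply List.take_of_length_le
    simp
  rw [h1, h2, pvInvA, pvSegs_concat _ _ _ (by simp), pvGetD_last, hsl]
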